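-- pv_equiv track=rewrite | github.com/zoisper/LA2 | treino1.py | repete
-- ===== SOURCE A (Python) =====
-- def repete(palavra,n):
--     repetidos = 0
--     sufixo = list(palavra)
--     for i in range(1, len(palavra)):
--         if palavra[:-i] == palavra[i:]:
--             del sufixo[: len(palavra)-i]
--             break
--     sufixo = "".join(sufixo)
--     result = palavra*(n>0)  + sufixo*(n-1)
--     return result
-- ===== SOURCE B (Python) =====
-- def repete(palavra, n):
--     if n <= 0:
--         return ""
--     L = len(palavra)
--     pi = [0] * L
--     for i in range(1, L):
--         k = pi[i - 1]
--         while k > 0 and palavra[i] != palavra[k]: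
--             k = pi[k - 1]
--         if palavra[i] == palavra[k]:
--             k += 1
--         pi[i] = k
--     k = pi[L - 1] if L > 0 else 0
--     return palavra + palavra[k:] * (n - 1)
-- ===== Notes on version B (the rewrite author's own statement) =====
-- stated objective: alternative
-- what changed: B computes the longest proper border with the KMP prefix-function table (one left-to-right pass with fallback links) instead of A's scan over shifts comparing full slices, then returns palavra + palavra[k:]*(n-1) with an early return for n<=0; building the repeated output dominates the runtime, so overall speed is unchanged.
import Mathlib
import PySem

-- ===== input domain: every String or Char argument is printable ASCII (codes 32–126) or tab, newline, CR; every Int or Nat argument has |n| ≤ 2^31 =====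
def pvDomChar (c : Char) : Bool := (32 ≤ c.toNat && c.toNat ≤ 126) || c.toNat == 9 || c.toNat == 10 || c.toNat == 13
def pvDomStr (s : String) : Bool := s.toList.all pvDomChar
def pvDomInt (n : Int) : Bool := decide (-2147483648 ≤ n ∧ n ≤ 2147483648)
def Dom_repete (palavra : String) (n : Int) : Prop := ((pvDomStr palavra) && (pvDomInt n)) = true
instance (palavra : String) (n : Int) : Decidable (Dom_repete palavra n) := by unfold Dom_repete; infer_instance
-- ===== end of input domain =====

-- B finds the longest proper border via the KMP prefix-function table instead of A's
-- shift scan with slice comparisons; same return value on every input (alternative algorithm).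

-- ===== PORT A =====
-- the 'for i in range(1, len(palavra))' loop: sufixo is carried unchanged until the break
def repeteLoopA (palavra : String) (is : List Int) (sufixo : List Char) : List Char :=
  match is with
  | [] => sufixo
  | i :: rest =>
      if PySem.Str.slice palavra none (some (-i)) = PySem.Str.slice palavra (some i) none then
        -- del sufixo[: len(palavra)-i]; break
        PySem.List.slice sufixo (some (PySem.Str.len palavra - i)) none
      else repeteLoopA palavra rest sufixo

def repete (palavra : String) (n : Int) : String :=
  let sufixo := palavra.toList
  let sufixo2 := repeteLoopA palavra (PySem.List.pyRange 1 (PySem.Str.len palavra) 1) sufixo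
  -- result = palavra*(n>0) + ("".join(sufixo))*(n-1)   (str*int ported as list repeat + ofList)
  String.ofList (PySem.List.pyRepeat palavra.toList (if 0 < n then 1 else 0) ++
                 PySem.List.pyRepeat sufixo2 (n - 1))

-- ===== PORT B =====
-- the 'while k > 0 and palavra[i] != palavra[k]: k = pi[k-1]' loop;
-- the 'min … (k-1)' only makes the recursion visibly terminating: table entries
-- satisfy pi[k-1] ≤ k-1 (proved below), so it never changes the value
def fbB (s : List Char) (pi : List Nat) (c : Char) (k : Nat) : Nat :=
  if h : k = 0 then 0
  else if s.getD k ' ' = c then k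
  else fbB s pi c (min (pi.getD (k - 1) 0) (k - 1))
termination_by k
decreasing_by
  have := Nat.min_le_right (pi.getD (k - 1) 0) (k - 1); omega

-- one iteration of 'for i in range(1, L)': append pi[i]
def kmpStep (s : List Char) (pi : List Nat) (i : Nat) : List Nat :=
  let k1 := fbB s pi (s.getD i ' ') (pi.getD (i - 1) 0)
  pi ++ [if s.getD i ' ' = s.getD k1 ' ' then k1 + 1 else k1]

-- table of prefix-function values for positions 0..i-1
def kmpTab (s : List Char) : Nat → List Nat
  | 0 => []
  | i + 1 => if i = 0 then [0] else kmpStep s (kmpTab s i) i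

def repete_alt (palavra : String) (n : Int) : String :=
  if n ≤ 0 then "" else
    let l := palavra.toList
    let pi := kmpTab l l.length
    let k : Nat := pi.getD (l.length - 1) 0
    -- palavra + palavra[k:] * (n-1)   (k is a Nat, so the slice is a drop)
    String.ofList (l ++ PySem.List.pyRepeat (l.drop k) (n - 1))

-- ===== PRECONDITION & SPEC =====
def Spec_repete (palavra : String) (n : Int) (out : String) : Prop := out = repete_alt palavra n
instance (palavra : String) (n : Int) (out : String) : Decidable (Spec_repete palavra n out) := by unfold Spec_repete; infer_instance

-- ===== CLAIM (what is proved, stated in full; the proofs are below) =====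
def Claim_equal_repete : Prop := ∀ (palavra : String) (n : Int), Dom_repete palavra n → Spec_repete palavra n (repete palavra n)

-- ===== LEMMAS AND PROOFS =====

-- 'k is a proper border of t': the length-k prefix equals the length-k suffix
def brd (t : List Char) (k : Nat) : Bool :=
  decide (k < t.length) && decide (t.take k = t.drop (t.length - k))

def maxB (t : List Char) : Nat := Nat.findGreatest (fun k => brd t k = true) (t.length - 1)

lemma brd_iff {t : List Char} {k : Nat} :
    brd t k = true ↔ k < t.length ∧ t.take k = t.drop (t.length - k) := by
  simp [brd]

lemma brd_zero {t : List Char} (h : t ≠ []) : brd t 0 = true := by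
  rw [brd_iff]
  exact ⟨List.length_pos_iff.mpr h, by simp⟩

lemma brd_lt {t : List Char} {k : Nat} (h : brd t k = true) : k < t.length :=
  (brd_iff.mp h).1

-- chain down: a smaller border of t is a border of t's border-prefix
lemma brd_chain_down {t : List Char} {k b : Nat} (hk : brd t k = true)
    (hb : brd t b = true) (hlt : b < k) : brd (t.take k) b = true := by
  rw [brd_iff] at hk hb ⊢
  obtain ⟨hkL, hkE⟩ := hk
  obtain ⟨hbL, hbE⟩ := hb
  have hlen : (t.take k).length = k := by simp; omega
  refine ⟨by omega, ?_⟩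
  rw [hlen]
  calc (t.take k).take b = t.take b := by rw [List.take_take]; congr 1; omega
    _ = t.drop (t.length - b) := hbE
    _ = (t.take k).drop (k - b) := by rw [hkE, List.drop_drop]; congr 1; omega

-- chain up: a border of a border-prefix is a border of t
lemma brd_chain_up {t : List Char} {k b : Nat} (hk : brd t k = true)
    (hb : brd (t.take k) b = true) : brd t b = true := by
  rw [brd_iff] at hk hb ⊢
  obtain ⟨hkL, hkE⟩ := hk
  obtain ⟨hbL, hbE⟩ := hb
  have hlen : (t.take k).length = k := by simp; omega
  rw [hlen] at hbL hbE
  refine ⟨by omega, ?_⟩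
  have h1 : t.take b = (t.take k).take b := by
    rw [List.take_take, Nat.min_eq_left (le_of_lt hbL)]
  rw [h1, hbE, hkE, List.drop_drop]
  congr 1
  omega

-- maxB is itself a border (for nonempty t), and bounds every border
lemma brd_maxB {t : List Char} (h : t ≠ []) : brd t (maxB t) = true := by
  have := Nat.findGreatest_spec (P := fun k => brd t k = true)
    (Nat.zero_le (t.length - 1)) (brd_zero h)
  simpa [maxB] using this

lemma le_maxB {t : List Char} {b : Nat} (hb : brd t b = true) : b ≤ maxB t :=
  Nat.le_findGreatest (by have := brd_lt hb; omega) hb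

lemma maxB_le {t : List Char} : maxB t ≤ t.length - 1 := Nat.findGreatest_le _

-- borders of t ++ [c] of positive length come from matching borders of t
lemma brd_snoc {t : List Char} {c : Char} {k : Nat} :
    brd (t ++ [c]) (k + 1) = true ↔ brd t k = true ∧ t.getD k ' ' = c := by
  rw [brd_iff, brd_iff]
  simp only [List.length_append, List.length_cons, List.length_nil]
  constructor
  · rintro ⟨hL, hE⟩
    have hk : k < t.length := by omega
    have e1 : (t ++ [c]).take (k + 1) = t.take k ++ [t.getD k ' '] := by
      rw [List.take_append_of_le_length (by omega), List.take_add_one,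
        List.getElem?_eq_getElem hk]
      simp [List.getD_eq_getElem?_getD, List.getElem?_eq_getElem hk]
    have e2 : (t ++ [c]).drop (t.length + 0 + 1 - (k + 1)) = t.drop (t.length - k) ++ [c] := by
      rw [List.drop_append_of_le_length (by omega)]
      congr 2
      omega
    rw [e1, e2] at hE
    obtain ⟨h1, h2⟩ := List.append_inj hE (by simp; omega)
    refine ⟨⟨hk, h1⟩, by simpa using h2⟩
  · rintro ⟨⟨hk, hE⟩, hc⟩
    refine ⟨by omega, ?_⟩
    have e1 : (t ++ [c]).take (k + 1) = t.take k ++ [t.getD k ' '] := by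
      rw [List.take_append_of_le_length (by omega), List.take_add_one,
        List.getElem?_eq_getElem hk]
      simp [List.getD_eq_getElem?_getD, List.getElem?_eq_getElem hk]
    have e2 : (t ++ [c]).drop (t.length + 0 + 1 - (k + 1)) = t.drop (t.length - k) ++ [c] := by
      rw [List.drop_append_of_le_length (by omega)]
      congr 2
      omega
    rw [e1, e2, hE, hc]

-- step: borders of s.take (i+1) of positive length come from matching borders of s.take i
lemma brd_step {s : List Char} {i k : Nat} (hi : i < s.length) :
    brd (s.take (i + 1)) (k + 1) = true ↔
      brd (s.take i) k = true ∧ s.getD k ' ' = s.getD i ' ' := by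
  have hleni : (s.take i).length = i := by rw [List.length_take]; omega
  have hsnoc : s.take (i + 1) = s.take i ++ [s.getD i ' '] := by
    rw [List.take_add_one, List.getElem?_eq_getElem hi]
    simp [List.getD_eq_getElem?_getD, List.getElem?_eq_getElem hi]
  have hgd : ∀ b : Nat, b < i → (s.take i).getD b ' ' = s.getD b ' ' := by
    intro b hb
    rw [List.getD_eq_getElem _ _ (by rw [hleni]; omega), List.getD_eq_getElem _ _ (by omega)]
    simp [List.getElem_take]
  rw [hsnoc, brd_snoc]
  constructor
  · rintro ⟨hb, hc⟩
    have hk : k < i := by have := brd_lt hb; rw [hleni] at this; omega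
    exact ⟨hb, by rw [← hgd k hk]; exact hc⟩
  · rintro ⟨hb, hc⟩
    have hk : k < i := by have := brd_lt hb; rw [hleni] at this; omega
    exact ⟨hb, by rw [hgd k hk]; exact hc⟩

-- the fallback loop: starting from a dominating border, it returns a dominating
-- border at which either k = 0 or the next character matches
lemma fbB_spec {s : List Char} {pi : List Nat} {c : Char} {i : Nat}
    (hi : 1 ≤ i) (hiL : i ≤ s.length)
    (Htab : ∀ j, j < i → pi.getD j 0 = maxB (s.take (j + 1))) :
    ∀ k, brd (s.take i) k = true →
      (∀ b, brd (s.take i) b = true → s.getD b ' ' = c → b ≤ k) →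
      (brd (s.take i) (fbB s pi c k) = true ∧
       (∀ b, brd (s.take i) b = true → s.getD b ' ' = c → b ≤ fbB s pi c k) ∧
       (fbB s pi c k = 0 ∨ s.getD (fbB s pi c k) ' ' = c)) := by
  intro k
  induction k using Nat.strong_induction_on with
  | _ k ih =>
    intro hbk hdom
    have hne : s.take i ≠ [] := by
      intro h
      have := brd_lt hbk
      simp [h] at this
    rw [fbB]
    by_cases h0 : k = 0
    · simp only [h0, dif_pos rfl]
      exact ⟨brd_zero hne, by simpa [h0] using hdom, Or.inl rfl⟩
    · rw [dif_neg h0]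
      by_cases hc : s.getD k ' ' = c
      · rw [if_pos hc]
        exact ⟨hbk, hdom, Or.inr hc⟩
      · rw [if_neg hc]
        have hkL : k < (s.take i).length := brd_lt hbk
        have hilen : (s.take i).length = i := by simp; omega
        have hki : k < i := by omega
        have htk : (s.take i).take k = s.take k := by
          rw [List.take_take, Nat.min_eq_left (by omega)]
        have hmax := Htab (k - 1) (by omega)
        have hk1 : k - 1 + 1 = k := by omega
        rw [hk1] at hmax
        have hmle : maxB (s.take k) ≤ k - 1 := by
          have := maxB_le (t := s.take k)
          have : (s.take k).length = k := by simp; omega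
          calc maxB (s.take k) ≤ (s.take k).length - 1 := maxB_le
          _ = k - 1 := by omega
        have hmin : min (pi.getD (k - 1) 0) (k - 1) = maxB (s.take k) := by
          rw [hmax]; omega
        rw [hmin]
        have hkne : s.take k ≠ [] := by
          intro h
          have : (s.take k).length = k := by simp; omega
          rw [h] at this
          simp at this
          omega
        -- the new start is a border of s.take i
        have hbrd_m : brd (s.take i) (maxB (s.take k)) = true := by
          apply brd_chain_up hbk
          rw [htk]
          exact brd_maxB hkne
        -- and still dominates all matching borders
        have hdom' : ∀ b, brd (s.take i) b = true → s.getD b ' ' = c → b ≤ maxB (s.take k) := by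
          intro b hb hbc
          have hble : b ≤ k := hdom b hb hbc
          have hbne : b ≠ k := by
            intro h
            rw [h] at hbc
            exact hc hbc
          have hblt : b < k := by omega
          apply le_maxB
          rw [← htk]
          exact brd_chain_down hbk hb hblt
        have := ih (maxB (s.take k)) (by omega) hbrd_m hdom'
        exact this

-- the new table entry is the maximal border of the extended prefix
lemma kmpStep_val {s : List Char} {pi : List Nat} {i : Nat}
    (hi : 1 ≤ i) (hiL : i < s.length)
    (Htab : ∀ j, j < i → pi.getD j 0 = maxB (s.take (j + 1))) :
    (if s.getD i ' ' = s.getD (fbB s pi (s.getD i ' ') (pi.getD (i - 1) 0)) ' '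
     then fbB s pi (s.getD i ' ') (pi.getD (i - 1) 0) + 1
     else fbB s pi (s.getD i ' ') (pi.getD (i - 1) 0)) = maxB (s.take (i + 1)) := by
  set c := s.getD i ' ' with hc
  have hne : s.take i ≠ [] := by
    intro h
    have : (s.take i).length = i := by simp; omega
    rw [h] at this
    simp at this
    omega
  have hilen : (s.take i).length = i := by simp; omega
  have hk0 : pi.getD (i - 1) 0 = maxB (s.take i) := by
    have := Htab (i - 1) (by omega)
    rwa [show i - 1 + 1 = i by omega] at this
  have hstart : brd (s.take i) (pi.getD (i - 1) 0) = true := by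
    rw [hk0]; exact brd_maxB hne
  have hdom0 : ∀ b, brd (s.take i) b = true → s.getD b ' ' = c → b ≤ pi.getD (i - 1) 0 := by
    intro b hb _
    rw [hk0]
    exact le_maxB hb
  obtain ⟨hbr, hdom, hex⟩ := fbB_spec hi (le_of_lt hiL) Htab _ hstart hdom0
  set r := fbB s pi c (pi.getD (i - 1) 0) with hr
  have hrlt : r < i := by
    have := brd_lt hbr
    omega
  have hlen1 : (s.take (i + 1)).length = i + 1 := by simp; omega
  by_cases hm : c = s.getD r ' '
  · rw [if_pos hm]
    -- r+1 is a border of s.take (i+1), and it is maximal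
    have hb1 : brd (s.take (i + 1)) (r + 1) = true :=
      (brd_step hiL).mpr ⟨hbr, hm.symm⟩
    apply le_antisymm
    · exact Nat.le_findGreatest (by rw [hlen1]; omega) hb1
    · -- every border of s.take (i+1) is ≤ r + 1
      by_contra hgt
      push_neg at hgt
      have hP : brd (s.take (i + 1)) (maxB (s.take (i + 1))) = true :=
        brd_maxB (by intro h; rw [h] at hlen1; simp at hlen1)
      rcases Nat.exists_eq_add_of_lt hgt with ⟨d, hd⟩
      set m := maxB (s.take (i + 1)) with hmdef
      obtain ⟨m', hm'⟩ : ∃ m', m = m' + 1 := ⟨m - 1, by omega⟩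
      rw [hm'] at hP
      obtain ⟨hbm', hcm'⟩ := (brd_step hiL).mp hP
      rw [← hc] at hcm'
      have : m' ≤ r := hdom m' hbm' hcm'
      omega
  · rw [if_neg hm]
    -- no positive border of s.take (i+1) exists; r must be 0
    have hr0 : r = 0 := by
      rcases hex with h | h
      · exact h
      · exact absurd h.symm hm
    rw [hr0]
    symm
    rw [maxB, Nat.findGreatest_eq_zero_iff]
    intro b hb0 hble hP
    obtain ⟨b', hb'⟩ : ∃ b', b = b' + 1 := ⟨b - 1, by omega⟩
    rw [hb'] at hP
    obtain ⟨hbb', hcb'⟩ := (brd_step hiL).mp hP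
    rw [← hc] at hcb'
    have : b' ≤ r := hdom b' hbb' hcb'
    have hb'0 : b' = 0 := by omega
    rw [hb'0] at hcb'
    rw [hr0] at hm
    exact hm hcb'.symm

-- the table is correct at every filled position
lemma kmpTab_spec (s : List Char) : ∀ i, 1 ≤ i → i ≤ s.length →
    (kmpTab s i).length = i ∧
    ∀ j, j < i → (kmpTab s i).getD j 0 = maxB (s.take (j + 1)) := by
  intro i
  induction i with
  | zero => intro h; omega
  | succ i ih =>
    intro _ hle
    by_cases h0 : i = 0
    · subst h0
      refine ⟨by simp [kmpTab], ?_⟩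
      intro j hj
      have hj0 : j = 0 := by omega
      subst hj0
      simp only [kmpTab, if_pos rfl]
      have : maxB (s.take 1) = 0 := by
        rw [maxB]
        have : (s.take 1).length - 1 = 0 := by
          have := List.length_take_le 1 s
          omega
        rw [this]
        rfl
      simp [this]
    · have hi1 : 1 ≤ i := by omega
      obtain ⟨hlen, htab⟩ := ih hi1 (by omega)
      have hstep := kmpStep_val (s := s) (pi := kmpTab s i) hi1 (by omega)
        (fun j hj => htab j hj)
      constructor
      · simp [kmpTab, h0, kmpStep, hlen]
      · intro j hj
        simp only [kmpTab, if_neg h0, kmpStep]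
        by_cases hji : j < i
        · rw [List.getD_append _ _ _ _ (by omega)]
          exact htab j hji
        · have hji' : j = i := by omega
          subst hji'
          rw [List.getD_append_right _ _ _ _ (by omega)]
          simpa [hlen] using hstep

-- A's loop from shift i0 returns the drop of the greatest border of length ≤ L - i0
lemma repeteLoopA_eq (p : String) : ∀ m i0 : Nat, i0 + m = p.toList.length → 1 ≤ i0 →
    repeteLoopA p (PySem.List.pyRange (i0 : Int) (p.toList.length : Int) 1) p.toList
      = p.toList.drop (Nat.findGreatest (fun k => brd p.toList k = true) m) := by
  intro m
  induction m with
  | zero =>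
    intro i0 hsum _
    rw [PySem.List.pyRange_one_eq_nil (by omega)]
    simp [repeteLoopA]
  | succ m ih =>
    intro i0 hsum hi0
    set l := p.toList with hl
    have hi0L : (i0 : Int) < (l.length : Int) := by omega
    rw [PySem.List.pyRange_one_cons hi0L]
    simp only [repeteLoopA]
    have hcond : (PySem.Str.slice p none (some (-(i0 : Int))) =
        PySem.Str.slice p (some (i0 : Int)) none) ↔ brd l (m + 1) = true := by
      rw [String.ext_iff]
      simp only [PySem.Str.toList_slice, PySem.Chars.slice_eq_listSlice, ← hl]
      rw [PySem.List.slice_to_neg_natCast l i0 (by omega), PySem.List.slice_from_natCast]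
      rw [brd_iff]
      constructor
      · intro h
        refine ⟨by omega, ?_⟩
        rw [show l.length - i0 = m + 1 from by omega] at h
        rw [h, show l.length - (m + 1) = i0 from by omega]
      · intro ⟨_, h⟩
        rw [show l.length - i0 = m + 1 from by omega, h,
          show l.length - (m + 1) = i0 from by omega]
    rw [Nat.findGreatest_succ]
    by_cases hb : brd l (m + 1) = true
    · rw [if_pos (hcond.mpr hb), if_pos hb]
      have : PySem.Str.len p - (i0 : Int) = ((m + 1 : Nat) : Int) := by
        rw [PySem.Str.len_eq, ← hl]; omega
      rw [this, PySem.List.slice_from_natCast]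
    · rw [if_neg (fun h => hb (hcond.mp h)), if_neg hb]
      have := ih (i0 + 1) (by omega) (by omega)
      rw [show ((i0 + 1 : Nat) : Int) = (i0 : Int) + 1 from by push_cast; ring] at this
      exact this

-- ===== VERDICT (by name: the statement is the Claim_ definition above) =====
theorem repete_spec : Claim_equal_repete := by
  unfold Claim_equal_repete Spec_repete
  intro p n _
  simp only [repete, repete_alt]
  by_cases hn : n ≤ 0
  · rw [if_pos hn]
    have h1 : (n - 1).toNat = 0 := by omega
    simp [PySem.List.pyRepeat, h1, show ¬ (0 < n) by omega]
  · rw [if_neg hn]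
    have hpos : 0 < n := by omega
    have hrep1 : PySem.List.pyRepeat p.toList (if 0 < n then 1 else 0) = p.toList := by
      simp [PySem.List.pyRepeat, hpos]
    rcases Nat.eq_zero_or_pos p.toList.length with h0 | hLpos
    · have hnil : p.toList = [] := List.length_eq_zero_iff.mp h0
      rw [PySem.Str.len_eq, h0]
      rw [PySem.List.pyRange_one_eq_nil (by omega)]
      simp [repeteLoopA, hrep1, hnil, kmpTab, PySem.List.pyRepeat]
    · have hmain : repeteLoopA p (PySem.List.pyRange 1 (PySem.Str.len p) 1) p.toList
          = p.toList.drop (Nat.findGreatest (fun k => brd p.toList k = true) (p.toList.length - 1)) := by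
        have h := repeteLoopA_eq p (p.toList.length - 1) 1 (by omega) (by omega)
        rw [PySem.Str.len_eq]
        simpa using h
      have htab := (kmpTab_spec p.toList p.toList.length (by omega) le_rfl).2
        (p.toList.length - 1) (by omega)
      rw [show p.toList.length - 1 + 1 = p.toList.length from by omega, List.take_length] at htab
      rw [hmain, hrep1, htab]
      rfl
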